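-- pv_equiv track=rewrite | github.com/matheusfsa/OptimizationAPI | algorithms/DVL.py | columns_vars
-- ===== SOURCE A (Python) =====
-- def columns_vars(n, m):
--     vetor = ['Obj_' + str(i) for i in range(m)]
--     res = []
--     for i in range(n):
--         vx = vetor.copy()
--         for j in range(i):
--             vx.append('Var_' + str(j))
--         res.append(vx)
--     return res
-- ===== SOURCE B (Python) =====
-- def columns_vars(n, m):
--     obj = ['Obj_' + str(i) for i in range(m)]
--     if n <= 0:
--         return []
--     res = [obj.copy()]
--     running = obj.copy()
--     for i in range(1, n):
--         running.append('Var_' + str(i - 1))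
--         res.append(running.copy())
--     return res
-- ===== Notes on version B (the rewrite author's own statement) =====
-- stated objective: alternative
-- what changed: Replaces A's per-row rebuild (inner range(i) loop re-appending all variable labels for every row) with a single growing accumulator that appends one label per row and snapshots a copy of it.
import Mathlib
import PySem

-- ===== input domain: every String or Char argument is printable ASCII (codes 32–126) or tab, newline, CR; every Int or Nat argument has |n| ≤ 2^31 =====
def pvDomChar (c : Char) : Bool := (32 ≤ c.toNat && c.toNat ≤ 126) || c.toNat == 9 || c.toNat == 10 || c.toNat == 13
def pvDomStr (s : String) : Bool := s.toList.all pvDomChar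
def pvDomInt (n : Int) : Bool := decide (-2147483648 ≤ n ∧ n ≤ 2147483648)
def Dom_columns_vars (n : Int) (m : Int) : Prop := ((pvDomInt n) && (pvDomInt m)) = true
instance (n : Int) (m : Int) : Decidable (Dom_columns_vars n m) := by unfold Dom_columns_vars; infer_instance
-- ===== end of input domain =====

-- B replaces A's per-row inner rebuild loop with one growing accumulator snapshotted per row (alternative decomposition).

-- ===== PORT A =====
def columns_vars (n : Int) (m : Int) : List (List String) :=
  let vetor := (PySem.List.pyRange 0 m 1).map (fun i => "Obj_" ++ PySem.Int.toStr i)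
  (PySem.List.pyRange 0 n 1).foldl (fun res i =>
    let vx := (PySem.List.pyRange 0 i 1).foldl
      (fun vx j => vx ++ ["Var_" ++ PySem.Int.toStr j]) vetor
    res ++ [vx]) []

-- ===== PORT B =====
def columns_vars_alt (n : Int) (m : Int) : List (List String) :=
  let obj := (PySem.List.pyRange 0 m 1).map (fun i => "Obj_" ++ PySem.Int.toStr i)
  if n ≤ 0 then []
  else
    let st := (PySem.List.pyRange 1 n 1).foldl
      (fun (st : List (List String) × List String) i =>
        let running := st.2 ++ ["Var_" ++ PySem.Int.toStr (i - 1)]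
        (st.1 ++ [running], running))
      ([obj], obj)
    st.1

-- ===== PRECONDITION & SPEC =====
def Spec_columns_vars (n : Int) (m : Int) (out : List (List String)) : Prop := out = columns_vars_alt n m
instance (n : Int) (m : Int) (out : List (List String)) : Decidable (Spec_columns_vars n m out) := by unfold Spec_columns_vars; infer_instance

-- ===== CLAIM (what is proved, stated in full; the proofs are below) =====
def Claim_equal_columns_vars : Prop := ∀ (n : Int) (m : Int), Dom_columns_vars n m → Spec_columns_vars n m (columns_vars n m)

-- ===== LEMMAS AND PROOFS =====

-- the common closed form: row i = vetor ++ ['Var_0', …, 'Var_(i-1)']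
def pvRow (vetor : List String) (i : Int) : List String :=
  vetor ++ (PySem.List.pyRange 0 i 1).map (fun j => "Var_" ++ PySem.Int.toStr j)

theorem pvA_closed (n : Int) (vetor : List String) :
    (PySem.List.pyRange 0 n 1).foldl (fun res i =>
      let vx := (PySem.List.pyRange 0 i 1).foldl
        (fun vx j => vx ++ ["Var_" ++ PySem.Int.toStr j]) vetor
      res ++ [vx]) []
    = (PySem.List.pyRange 0 n 1).map (pvRow vetor) := by
  have h : ∀ (l : List Int) (acc : List (List String)),
      l.foldl (fun res i =>
        let vx := (PySem.List.pyRange 0 i 1).foldl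
          (fun vx j => vx ++ ["Var_" ++ PySem.Int.toStr j]) vetor
        res ++ [vx]) acc = acc ++ l.map (pvRow vetor) := by
    intro l
    induction l with
    | nil => intro acc; simp
    | cons x xs ih =>
      intro acc
      simp only [List.foldl_cons, List.map_cons, ih]
      rw [PySem.List.foldl_append_singleton_eq_map]
      simp [pvRow]
  simpa using h _ []

-- B's loop invariant, by induction on how far the range extends
theorem pvB_invariant (k : Nat) (vetor : List String) :
    (PySem.List.pyRange 1 ((k : Int) + 1) 1).foldl
      (fun (st : List (List String) × List String) i =>
        let running := st.2 ++ ["Var_" ++ PySem.Int.toStr (i - 1)]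
        (st.1 ++ [running], running))
      ([vetor], vetor)
    = ((PySem.List.pyRange 0 ((k : Int) + 1) 1).map (pvRow vetor), pvRow vetor (k : Int)) := by
  induction k with
  | zero =>
    simp [PySem.List.pyRange_one_eq_nil, pvRow,
      PySem.List.pyRange_zero]
  | succ k ih =>
    have h1 : (1 : Int) ≤ (k : Int) + 1 := by omega
    have h2 : (0 : Int) ≤ (k : Int) + 1 := by omega
    have h0 : (0 : Int) ≤ (k : Int) := by omega
    rw [show (((k : Nat) + 1 : Nat) : Int) + 1 = ((k : Int) + 1) + 1 by push_cast; ring]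
    rw [PySem.List.pyRange_one_succ_right h1, List.foldl_append, ih]
    have hrow : pvRow vetor ((k : Int)) ++ ["Var_" ++ PySem.Int.toStr ((k : Int) + 1 - 1)]
        = pvRow vetor ((k : Int) + 1) := by
      simp only [pvRow, PySem.List.pyRange_one_succ_right h0, List.map_append, List.append_assoc]
      norm_num
    simp only [List.foldl_cons, List.foldl_nil]
    rw [show ((PySem.List.pyRange 0 (((k:Int)+1)+1) 1) = PySem.List.pyRange 0 ((k:Int)+1) 1 ++ [(k:Int)+1]) from PySem.List.pyRange_one_succ_right h2]
    simp only [List.map_append, List.map_cons, List.map_nil]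
    rw [hrow]
    push_cast
    rfl

-- ===== VERDICT (by name: the statement is the Claim_ definition above) =====
theorem columns_vars_spec : Claim_equal_columns_vars := by
  intro n m _
  unfold Spec_columns_vars columns_vars columns_vars_alt
  by_cases hn : n ≤ 0
  · simp [hn, PySem.List.pyRange_one_eq_nil hn]
  · simp only [hn, if_false]
    rw [pvA_closed]
    obtain ⟨k, hk⟩ : ∃ k : Nat, n = (k : Int) + 1 := by
      refine ⟨(n - 1).toNat, ?_⟩; omega
    subst hk
    rw [pvB_invariant]
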